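-- pv_equiv track=rewrite | github.com/ryanboyd/ContentCoder-Py | src/contentcoder/ContentCodingDictionary.py | GetSortedTermList
-- ===== SOURCE A (Python) =====
-- def GetSortedTermList(dicTermList) -> list:
--     '''Provides a rule-appropriate list of terms of the dictionary'''
--
--     termList = dicTermList.copy()
--     termList.sort()
--
--     # relocate words that start with wildcards to the end
--     termListWildcardStarts = []
--
--     for i in range(0, len(termList)):
--         if termList[i].startswith('*'):
--             termListWildcardStarts.append(termList[i])
--
--     for term in termListWildcardStarts:
--         termList.remove(term)
--
--     termList.extend(termListWildcardStarts)
--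
--     return termList
-- ===== SOURCE B (Python) =====
-- def GetSortedTermList(dicTermList) -> list:
--     '''Provides a rule-appropriate list of terms of the dictionary'''
--     wildcardStarts = sorted(t for t in dicTermList if t.startswith('*'))
--     plain = sorted(t for t in dicTermList if not t.startswith('*'))
--     return plain + wildcardStarts
-- ===== Notes on version B (the rewrite author's own statement) =====
-- stated objective: alternative
-- what changed: B partitions the terms by wildcard prefix first and sorts the two groups independently, replacing A's full sort followed by a collect/remove/extend relocation pass.
import Mathlib
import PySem

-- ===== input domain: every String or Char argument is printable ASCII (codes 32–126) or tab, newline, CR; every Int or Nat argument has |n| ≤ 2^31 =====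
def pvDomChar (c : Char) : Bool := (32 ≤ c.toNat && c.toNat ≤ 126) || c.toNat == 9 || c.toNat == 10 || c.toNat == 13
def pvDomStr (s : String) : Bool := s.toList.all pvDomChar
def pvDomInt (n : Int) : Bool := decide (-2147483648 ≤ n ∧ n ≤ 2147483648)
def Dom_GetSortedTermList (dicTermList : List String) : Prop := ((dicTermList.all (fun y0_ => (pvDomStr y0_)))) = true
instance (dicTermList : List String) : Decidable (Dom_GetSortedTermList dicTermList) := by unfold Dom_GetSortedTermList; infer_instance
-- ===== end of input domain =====

-- B replaces A's sort-then-remove/extend relocation by partitioning first and sorting the two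
-- groups separately (objective: alternative decomposition; no remove/extend relocation pass).


-- ===== PORT A =====
def GetSortedTermList (dicTermList : List String) : List String :=
  -- termList = dicTermList.copy(); termList.sort()
  let termList := PySem.List.sorted dicTermList (fun x => x) false
  -- for i in range(0, len(termList)): if termList[i].startswith('*'): termListWildcardStarts.append(termList[i])
  let termListWildcardStarts :=
    (PySem.List.pyRange 0 (PySem.List.len termList) 1).foldl
      (fun acc i =>
        if PySem.Str.startswith (PySem.List.pyGetD termList i "") "*" then
          acc ++ [PySem.List.pyGetD termList i ""]
        else acc) []
  -- for term in termListWildcardStarts: termList.remove(term)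
  -- list.remove raises ValueError only if the term is absent; every term here came from
  -- termList, so remove? is always `some` and the `.getD` default is unreachable.
  let termList2 :=
    termListWildcardStarts.foldl (fun acc t => (PySem.List.remove? acc t).getD acc) termList
  -- termList.extend(termListWildcardStarts)
  termList2 ++ termListWildcardStarts

-- ===== PORT B =====
def GetSortedTermList_alt (dicTermList : List String) : List String :=
  let wildcardStarts :=
    PySem.List.sorted (dicTermList.filter (fun t => PySem.Str.startswith t "*")) (fun x => x) false
  let plain :=
    PySem.List.sorted (dicTermList.filter (fun t => !PySem.Str.startswith t "*")) (fun x => x) false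
  plain ++ wildcardStarts

-- ===== PRECONDITION & SPEC =====
def Spec_GetSortedTermList (dicTermList : List String) (out : List String) : Prop := out = GetSortedTermList_alt dicTermList
instance (dicTermList : List String) (out : List String) : Decidable (Spec_GetSortedTermList dicTermList out) := by unfold Spec_GetSortedTermList; infer_instance

-- ===== CLAIM (what is proved, stated in full; the proofs are below) =====
def Claim_equal_GetSortedTermList : Prop := ∀ (dicTermList : List String), Dom_GetSortedTermList dicTermList → Spec_GetSortedTermList dicTermList (GetSortedTermList dicTermList)

-- ===== LEMMAS AND PROOFS =====

-- Removing elements that all differ from the head leaves the head in place.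
theorem pv_foldl_remove_cons (x : String) :
    ∀ (ts l : List String), (∀ t ∈ ts, t ≠ x) →
      ts.foldl (fun acc t => (PySem.List.remove? acc t).getD acc) (x :: l)
        = x :: ts.foldl (fun acc t => (PySem.List.remove? acc t).getD acc) l := by
  intro ts
  induction ts with
  | nil => intro l _; rfl
  | cons t ts ih =>
    intro l h
    have hne : t ≠ x := h t (List.mem_cons_self ..)
    have hx : x ≠ t := fun he => hne he.symm
    have hstep : (PySem.List.remove? (x :: l) t).getD (x :: l)
        = x :: (PySem.List.remove? l t).getD l := by
      rw [PySem.List.remove?_cons_of_ne l hx]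
      cases PySem.List.remove? l t <;> rfl
    simp only [List.foldl_cons, hstep]
    exact ih _ (fun u hu => h u (List.mem_cons_of_mem _ hu))

-- The remove loop over the p-filtered terms deletes exactly the p-terms.
theorem pv_foldl_remove_filter (p : String → Bool) :
    ∀ (l : List String),
      (l.filter p).foldl (fun acc t => (PySem.List.remove? acc t).getD acc) l
        = l.filter (fun x => !p x) := by
  intro l
  induction l with
  | nil => rfl
  | cons x l ih =>
    by_cases hp : p x = true
    · simp only [List.filter_cons, hp, if_pos, List.foldl_cons,
        PySem.List.remove?_cons_self, Option.getD_some]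
      simpa [List.filter_cons] using ih
    · have hne : ∀ t ∈ l.filter p, t ≠ x := by
        intro t ht he
        exact hp (he ▸ (List.of_mem_filter ht))
      simp only [List.filter_cons, hp, if_neg, Bool.not_eq_true]
      rw [pv_foldl_remove_cons x (l.filter p) l hne, ih]
      simp

-- Filtering a sorted list is sorting the filtered list (stability is irrelevant for key = id).
theorem pv_filter_sorted (q : String → Bool) (xs : List String) :
    (PySem.List.sorted xs (fun x => x) false).filter q
      = PySem.List.sorted (xs.filter q) (fun x => x) false := by
  symm
  apply PySem.List.sorted_id_eq_of_perm_of_pairwise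
  · exact (PySem.List.sorted_perm xs (fun x => x) false).filter q
  · exact List.Pairwise.sublist List.filter_sublist
      (PySem.List.sorted_pairwise xs (fun x => x))

-- ===== VERDICT (by name: the statement is the Claim_ definition above) =====
theorem GetSortedTermList_spec : Claim_equal_GetSortedTermList := by
  intro xs _
  unfold Spec_GetSortedTermList GetSortedTermList GetSortedTermList_alt
  simp only []
  set p : String → Bool := fun t => PySem.Str.startswith t "*" with hp
  set s := PySem.List.sorted xs (fun x => x) false with hs
  have hw :
      (PySem.List.pyRange 0 (PySem.List.len s) 1).foldl
        (fun acc i =>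
          if p (PySem.List.pyGetD s i "") then acc ++ [PySem.List.pyGetD s i ""] else acc) []
        = s.filter p := by
    rw [PySem.List.foldl_pyRange_zero_pyGetD s ""
      (fun acc x => if p x then acc ++ [x] else acc) []]
    simpa using PySem.List.foldl_append_if_eq_filter p s []
  rw [hw, pv_foldl_remove_filter p s, hs, pv_filter_sorted p, pv_filter_sorted (fun x => !p x)]
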